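-- pv_equiv track=rewrite | github.com/croner01/logoscope | topology-service/graph/hybrid_topology_utils.py | is_service_pair_related
-- ===== SOURCE A (Python) =====
-- def is_service_pair_related(service1: str, service2: str) -> bool:
--     """Heuristic check whether two services are likely related."""
--     service1_lower = str(service1 or "").lower()
--     service2_lower = str(service2 or "").lower()
--
--     if "frontend" in service1_lower and "backend" in service2_lower:
--         return True
--     if "frontend" in service2_lower and "backend" in service1_lower:
--         return True
--
--     db_keywords = ["database", "db", "mysql", "postgres", "mongodb", "clickhouse"]
--     service1_is_db = any(keyword in service1_lower for keyword in db_keywords)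
--     service2_is_db = any(keyword in service2_lower for keyword in db_keywords)
--     if service1_is_db ^ service2_is_db:
--         return True
--
--     cache_keywords = ["cache", "redis", "memcached"]
--     service1_is_cache = any(keyword in service1_lower for keyword in cache_keywords)
--     service2_is_cache = any(keyword in service2_lower for keyword in cache_keywords)
--     if service1_is_cache ^ service2_is_cache:
--         return True
--
--     service1_is_registry = "registry" in service1_lower
--     service2_is_registry = "registry" in service2_lower
--     if service1_is_registry ^ service2_is_registry:
--         return True
--
--     return False
-- ===== SOURCE B (Python) =====
-- _KEYWORD_BITS = [
--     ("frontend", 1), ("backend", 2),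
--     ("database", 4), ("db", 4), ("mysql", 4), ("postgres", 4),
--     ("mongodb", 4), ("clickhouse", 4),
--     ("cache", 8), ("redis", 8), ("memcached", 8),
--     ("registry", 16),
-- ]
--
--
-- def _mask(s):
--     """Role bitmask of s: one left-to-right scan over positions, OR-ing the
--     bit of every keyword that starts at that position."""
--     m = 0
--     for i in range(len(s)):
--         for kw, bit in _KEYWORD_BITS:
--             if s.startswith(kw, i):
--                 m |= bit
--     return m
--
--
-- def is_service_pair_related(service1: str, service2: str) -> bool:
--     m1 = _mask(str(service1 or "").lower())
--     m2 = _mask(str(service2 or "").lower())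
--     return bool((m1 & 1 and m2 & 2) or (m2 & 1 and m1 & 2)
--                 or ((m1 ^ m2) & 0b11100))
-- ===== Notes on version B (the rewrite author's own statement) =====
-- stated objective: alternative
-- what changed: Replaces A's keyword-driven branches (one 'in' scan per keyword per category, XORed category by category with early returns) by a single position-driven scan per name against one flat keyword-to-bit table, accumulating a role bitmask, with the verdict computed by bit arithmetic ((m1^m2)&0b11100 plus the frontend/backend cross bits).
import Mathlib
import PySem

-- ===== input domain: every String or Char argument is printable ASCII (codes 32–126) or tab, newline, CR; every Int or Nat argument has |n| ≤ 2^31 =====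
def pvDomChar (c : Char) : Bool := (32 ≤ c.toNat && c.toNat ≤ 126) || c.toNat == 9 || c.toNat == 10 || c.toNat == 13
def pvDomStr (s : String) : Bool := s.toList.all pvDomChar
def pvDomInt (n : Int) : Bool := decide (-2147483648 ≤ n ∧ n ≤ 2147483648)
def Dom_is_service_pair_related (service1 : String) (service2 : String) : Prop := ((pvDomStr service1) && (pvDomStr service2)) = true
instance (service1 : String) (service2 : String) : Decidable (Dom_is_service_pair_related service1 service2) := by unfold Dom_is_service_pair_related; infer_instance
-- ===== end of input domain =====

-- B replaces A's keyword-driven per-category XOR branches by one position-driven scan per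
-- name over a flat keyword→bit table accumulating a role bitmask, decided by bit arithmetic
-- (objective: alternative).

-- ===== PORT A =====
def is_service_pair_related (service1 : String) (service2 : String) : Bool :=
  let service1_lower := PySem.Str.lower service1
  let service2_lower := PySem.Str.lower service2
  if PySem.Str.isIn "frontend" service1_lower && PySem.Str.isIn "backend" service2_lower then true
  else if PySem.Str.isIn "frontend" service2_lower && PySem.Str.isIn "backend" service1_lower then true
  else
    let db_keywords := ["database", "db", "mysql", "postgres", "mongodb", "clickhouse"]
    let service1_is_db := db_keywords.any (fun keyword => PySem.Str.isIn keyword service1_lower)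
    let service2_is_db := db_keywords.any (fun keyword => PySem.Str.isIn keyword service2_lower)
    if service1_is_db.xor service2_is_db then true
    else
      let cache_keywords := ["cache", "redis", "memcached"]
      let service1_is_cache := cache_keywords.any (fun keyword => PySem.Str.isIn keyword service1_lower)
      let service2_is_cache := cache_keywords.any (fun keyword => PySem.Str.isIn keyword service2_lower)
      if service1_is_cache.xor service2_is_cache then true
      else
        let service1_is_registry := PySem.Str.isIn "registry" service1_lower
        let service2_is_registry := PySem.Str.isIn "registry" service2_lower
        if service1_is_registry.xor service2_is_registry then true
        else false

-- ===== PORT B =====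
def pvKeywordBits : List (String × Nat) :=
  [("frontend", 1), ("backend", 2),
   ("database", 4), ("db", 4), ("mysql", 4), ("postgres", 4),
   ("mongodb", 4), ("clickhouse", 4),
   ("cache", 8), ("redis", 8), ("memcached", 8),
   ("registry", 16)]

-- _mask: one scan over the positions i of s; s.startswith(kw, i) with 0 ≤ i < len(s) is
-- exactly the prefix test on the i-th suffix (ported by hand: exact for in-range indices)
-- the inner loop of _mask: OR into m the bit of every keyword starting at this position
def pvStep (u : List Char) (m : Nat) : Nat :=
  pvKeywordBits.foldl
    (fun m p => if PySem.Chars.startswith u p.1.toList then m ||| p.2 else m) m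

def pvMask (s : String) : Nat :=
  (List.range s.toList.length).foldl (fun m i => pvStep (s.toList.drop i) m) 0

def is_service_pair_related_alt (service1 : String) (service2 : String) : Bool :=
  let m1 := pvMask (PySem.Str.lower service1)
  let m2 := pvMask (PySem.Str.lower service2)
  (decide (m1 &&& 1 ≠ 0) && decide (m2 &&& 2 ≠ 0))
    || (decide (m2 &&& 1 ≠ 0) && decide (m1 &&& 2 ≠ 0))
    || decide ((m1 ^^^ m2) &&& 28 ≠ 0)

-- ===== PRECONDITION & SPEC =====
def Spec_is_service_pair_related (service1 : String) (service2 : String) (out : Bool) : Prop := out = is_service_pair_related_alt service1 service2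
instance (service1 : String) (service2 : String) (out : Bool) : Decidable (Spec_is_service_pair_related service1 service2 out) := by unfold Spec_is_service_pair_related; infer_instance

-- ===== CLAIM (what is proved, stated in full; the proofs are below) =====
def Claim_equal_is_service_pair_related : Prop := ∀ (service1 : String) (service2 : String), Dom_is_service_pair_related service1 service2 → Spec_is_service_pair_related service1 service2 (is_service_pair_related service1 service2)

-- ===== LEMMAS AND PROOFS =====

-- proof-side closed form of a role bitmask from its five flags
def pvE (f b d c r : Bool) : Nat :=
  (if f then 1 else 0) ||| (if b then 2 else 0) ||| (if d then 4 else 0)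
    ||| (if c then 8 else 0) ||| (if r then 16 else 0)

-- the five category flags of a name, in A's keyword order / association
def pvFf (t : List Char) : Bool := PySem.Chars.isIn "frontend".toList t
def pvFb (t : List Char) : Bool := PySem.Chars.isIn "backend".toList t
def pvFd (t : List Char) : Bool :=
  PySem.Chars.isIn "database".toList t
    || (PySem.Chars.isIn "db".toList t
    || (PySem.Chars.isIn "mysql".toList t
    || (PySem.Chars.isIn "postgres".toList t
    || (PySem.Chars.isIn "mongodb".toList t
    || PySem.Chars.isIn "clickhouse".toList t))))
def pvFc (t : List Char) : Bool :=
  PySem.Chars.isIn "cache".toList t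
    || (PySem.Chars.isIn "redis".toList t
    || PySem.Chars.isIn "memcached".toList t)
def pvFr (t : List Char) : Bool := PySem.Chars.isIn "registry".toList t

theorem pvE1 (sw f b d c r : Bool) :
    (if sw then pvE f b d c r ||| 1 else pvE f b d c r) = pvE (f || sw) b d c r := by
  cases sw <;> cases f <;> cases b <;> cases d <;> cases c <;> cases r <;> decide
theorem pvE2 (sw f b d c r : Bool) :
    (if sw then pvE f b d c r ||| 2 else pvE f b d c r) = pvE f (b || sw) d c r := by
  cases sw <;> cases f <;> cases b <;> cases d <;> cases c <;> cases r <;> decide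
theorem pvE4 (sw f b d c r : Bool) :
    (if sw then pvE f b d c r ||| 4 else pvE f b d c r) = pvE f b (d || sw) c r := by
  cases sw <;> cases f <;> cases b <;> cases d <;> cases c <;> cases r <;> decide
theorem pvE8 (sw f b d c r : Bool) :
    (if sw then pvE f b d c r ||| 8 else pvE f b d c r) = pvE f b d (c || sw) r := by
  cases sw <;> cases f <;> cases b <;> cases d <;> cases c <;> cases r <;> decide
theorem pvE16 (sw f b d c r : Bool) :
    (if sw then pvE f b d c r ||| 16 else pvE f b d c r) = pvE f b d c (r || sw) := by
  cases sw <;> cases f <;> cases b <;> cases d <;> cases c <;> cases r <;> decide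

theorem pv_isIn_cons (kw : List Char) (ch : Char) (t : List Char) :
    PySem.Chars.isIn kw (ch :: t)
      = (PySem.Chars.startswith (ch :: t) kw || PySem.Chars.isIn kw t) := by
  rw [Bool.eq_iff_iff]
  simp only [Bool.or_eq_true, PySem.Chars.isIn_iff_infix,
    PySem.Chars.startswith_iff, List.infix_cons_iff]

theorem pvE_congr {x1 x2 x3 x4 x5 y1 y2 y3 y4 y5 : Bool}
    (h1 : x1 = y1) (h2 : x2 = y2) (h3 : x3 = y3) (h4 : x4 = y4) (h5 : x5 = y5) :
    pvE x1 x2 x3 x4 x5 = pvE y1 y2 y3 y4 y5 := by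
  rw [h1, h2, h3, h4, h5]

-- one step of the scan: the inner fold over the keyword table, from a pvE-shaped accumulator
theorem pv_inner (u : List Char) (f b d c r : Bool) :
    pvStep u (pvE f b d c r)
      = pvE (f || PySem.Chars.startswith u "frontend".toList)
            (b || PySem.Chars.startswith u "backend".toList)
            (d || PySem.Chars.startswith u "database".toList
               || PySem.Chars.startswith u "db".toList
               || PySem.Chars.startswith u "mysql".toList
               || PySem.Chars.startswith u "postgres".toList
               || PySem.Chars.startswith u "mongodb".toList
               || PySem.Chars.startswith u "clickhouse".toList)
            (c || PySem.Chars.startswith u "cache".toList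
               || PySem.Chars.startswith u "redis".toList
               || PySem.Chars.startswith u "memcached".toList)
            (r || PySem.Chars.startswith u "registry".toList) := by
  simp only [pvStep, pvKeywordBits, List.foldl_cons, List.foldl_nil, pvE1, pvE2, pvE4, pvE8, pvE16]

-- the whole position scan, over an arbitrary suffix list and pvE-shaped accumulator
theorem pv_mask_fold (t : List Char) (f b d c r : Bool) :
    (List.range t.length).foldl (fun m i => pvStep (t.drop i) m) (pvE f b d c r)
      = pvE (f || pvFf t) (b || pvFb t) (d || pvFd t) (c || pvFc t) (r || pvFr t) := by
  induction t generalizing f b d c r with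
  | nil =>
    simp only [List.length_nil, List.range_zero, List.foldl_nil]
    cases f <;> cases b <;> cases d <;> cases c <;> cases r <;> decide
  | cons ch t ih =>
    rw [List.length_cons, List.range_succ_eq_map, List.foldl_cons, List.foldl_map]
    simp only [List.drop_succ_cons, List.drop_zero]
    rw [pv_inner, ih]
    apply pvE_congr <;>
      · simp only [pvFf, pvFb, pvFd, pvFc, pvFr, pv_isIn_cons]
        ac_rfl

theorem pvMask_closed (s : String) :
    pvMask s = pvE (pvFf s.toList) (pvFb s.toList) (pvFd s.toList) (pvFc s.toList) (pvFr s.toList) := by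
  have h0 : (0 : Nat) = pvE false false false false false := by decide
  rw [pvMask, h0, pv_mask_fold]
  simp only [Bool.false_or]

-- the two decision layers agree for any five flags per side
theorem pv_core (f1 b1 d1 c1 r1 f2 b2 d2 c2 r2 : Bool) :
    (if f1 && b2 then true
     else if f2 && b1 then true
     else if d1.xor d2 then true
     else if c1.xor c2 then true
     else if r1.xor r2 then true
     else false)
    = ((decide (pvE f1 b1 d1 c1 r1 &&& 1 ≠ 0) && decide (pvE f2 b2 d2 c2 r2 &&& 2 ≠ 0))
        || (decide (pvE f2 b2 d2 c2 r2 &&& 1 ≠ 0) && decide (pvE f1 b1 d1 c1 r1 &&& 2 ≠ 0))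
        || decide ((pvE f1 b1 d1 c1 r1 ^^^ pvE f2 b2 d2 c2 r2) &&& 28 ≠ 0)) := by
  revert f1 b1 d1 c1 r1 f2 b2 d2 c2 r2
  decide

-- ===== VERDICT (by name: the statement is the Claim_ definition above) =====
theorem is_service_pair_related_spec : Claim_equal_is_service_pair_related := by
  intro s1 s2 _
  unfold Spec_is_service_pair_related
  simp only [is_service_pair_related, is_service_pair_related_alt, List.any_cons, List.any_nil,
    Bool.or_false, PySem.Str.isIn_eq, pvMask_closed]
  exact pv_core _ _ _ _ _ _ _ _ _ _
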